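-- pv_equiv track=rewrite | github.com/aneeshakella17/ModernArtRendering | Pointillism/impressionist_rendering.py | clipRectangle
-- ===== SOURCE A (Python) =====
-- def clipRectangle(A, B, C, D, min_y, min_x, max_y, max_x, center, lines):
--     first_set = False;
--     first_white_pixel = [];
--     last_white_pixel = [];
--     for y in range(min_y, max_y):
--         for x in range(min_x, max_x):
--             if (inRectangle(A, B, C, D, (x, y))):
--                 if (lines[y][x] == 1 and not first_set):
--                     first_white_pixel = (x, y);
--                     first_set = True
--                 elif (lines[y][x] == 1 and first_set):
--                     last_white_pixel = (x, y);
--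
--
--     if(len(first_white_pixel) == 0 or len(last_white_pixel) == 0):
--         return A,B,C,D
--     elif(inRectangle(A, B, first_white_pixel, last_white_pixel, center)):
--         return A, B, first_white_pixel, last_white_pixel;
--     elif(inRectangle(A, C, first_white_pixel, last_white_pixel, center)):
--         return C, D, first_white_pixel, last_white_pixel;
--     elif(inRectangle(A, D, first_white_pixel, last_white_pixel, center)):
--         return A, D, first_white_pixel, last_white_pixel;
--     elif(inRectangle(B, C, first_white_pixel, last_white_pixel, center)):
--         return B, C, first_white_pixel, last_white_pixel;
--     elif(inRectangle(B, D, first_white_pixel, last_white_pixel, center)):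
--         return B, D, first_white_pixel, last_white_pixel;
--     elif(inRectangle(C, D, first_white_pixel, last_white_pixel, center)):
--         return C, D, first_white_pixel, last_white_pixel;
--
-- def inRectangle(A, B, C, D, pt):
--     return inTri(pt, A, B, C) or inTri(pt, D, B, C);
--
-- def inTri(pt, point1, point2, point3):
--     b1 = cross_prod(pt, point1, point2) < 0.0;
--     b2 = cross_prod(pt, point2, point3) < 0.0;
--     b3 = cross_prod(pt, point3, point1) < 0.0;
--     return b1 == b2 and b2 == b3;
--
-- def cross_prod(point1, point2, point3):
--     return (point1[0] - point3[0]) * (point2[1] - point3[1]) - (point1[1] - point3[1]) * (point2[0] - point3[0])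
-- ===== SOURCE B (Python) =====
-- def cross_prod(point1, point2, point3):
--     return (point1[0] - point3[0]) * (point2[1] - point3[1]) - (point1[1] - point3[1]) * (point2[0] - point3[0])
--
-- def inTri(pt, point1, point2, point3):
--     b1 = cross_prod(pt, point1, point2) < 0.0
--     b2 = cross_prod(pt, point2, point3) < 0.0
--     b3 = cross_prod(pt, point3, point1) < 0.0
--     return b1 == b2 and b2 == b3
--
-- def inRectangle(A, B, C, D, pt):
--     return inTri(pt, A, B, C) or inTri(pt, D, B, C)
--
-- def clipRectangle(A, B, C, D, min_y, min_x, max_y, max_x, center, lines):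
--     def white(x, y):
--         return inRectangle(A, B, C, D, (x, y)) and lines[y][x] == 1
--     first = next(((x, y) for y in range(min_y, max_y)
--                          for x in range(min_x, max_x) if white(x, y)), None)
--     if first is None:
--         return A, B, C, D
--     last = next(((x, y) for y in reversed(range(min_y, max_y))
--                         for x in reversed(range(min_x, max_x)) if white(x, y)), None)
--     if last == first:
--         return A, B, C, D
--     if inRectangle(A, B, first, last, center):
--         return A, B, first, last
--     if inRectangle(A, C, first, last, center):
--         return C, D, first, last
--     if inRectangle(A, D, first, last, center):
--         return A, D, first, last
--     if inRectangle(B, C, first, last, center):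
--         return B, C, first, last
--     if inRectangle(B, D, first, last, center):
--         return B, D, first, last
--     if inRectangle(C, D, first, last, center):
--         return C, D, first, last
-- ===== Notes on version B (the rewrite author's own statement) =====
-- stated objective: alternative
-- what changed: A's single full nested sweep that carries first/last loop state across every pixel is replaced by two independent early-exit scans (a forward row-major scan for the first white in-rectangle pixel and a backward scan for the last, with a first==last guard for the single-white-pixel case); …
import Mathlib
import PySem

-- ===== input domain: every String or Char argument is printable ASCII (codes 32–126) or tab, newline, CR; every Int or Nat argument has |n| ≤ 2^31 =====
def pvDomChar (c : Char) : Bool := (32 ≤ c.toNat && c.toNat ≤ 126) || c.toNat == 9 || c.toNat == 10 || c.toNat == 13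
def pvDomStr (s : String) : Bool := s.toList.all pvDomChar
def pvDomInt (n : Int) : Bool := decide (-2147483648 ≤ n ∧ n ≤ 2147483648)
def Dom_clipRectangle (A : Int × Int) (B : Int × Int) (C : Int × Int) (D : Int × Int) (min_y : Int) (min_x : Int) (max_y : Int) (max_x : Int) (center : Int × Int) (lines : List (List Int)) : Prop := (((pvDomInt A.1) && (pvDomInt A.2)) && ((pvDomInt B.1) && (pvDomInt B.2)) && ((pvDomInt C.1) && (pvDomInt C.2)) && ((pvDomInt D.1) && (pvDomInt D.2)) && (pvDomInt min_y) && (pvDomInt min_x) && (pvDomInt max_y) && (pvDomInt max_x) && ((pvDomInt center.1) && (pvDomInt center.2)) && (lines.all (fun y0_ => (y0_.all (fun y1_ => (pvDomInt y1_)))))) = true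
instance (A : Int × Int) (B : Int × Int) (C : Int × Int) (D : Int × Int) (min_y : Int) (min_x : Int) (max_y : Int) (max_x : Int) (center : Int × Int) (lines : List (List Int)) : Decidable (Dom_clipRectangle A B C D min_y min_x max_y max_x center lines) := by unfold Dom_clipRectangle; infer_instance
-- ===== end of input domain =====

-- B replaces A's single full nested sweep (maintaining first/last loop state) by two early-exit
-- scans (forward for the first white pixel, backward for the last); objective: alternative.
-- Both Pythons fall off the branch cascade (returning None) on the same inputs; Pre_ excludes those.

-- ===== PORT A =====
-- helpers shared with the Python module (cross_prod / inTri / inRectangle, used verbatim by both Pythons)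
def pvCross (p1 p2 p3 : Int × Int) : Int :=
  (p1.1 - p3.1) * (p2.2 - p3.2) - (p1.2 - p3.2) * (p2.1 - p3.1)

def pvInTri (pt p1 p2 p3 : Int × Int) : Bool :=
  let b1 := decide (pvCross pt p1 p2 < 0)
  let b2 := decide (pvCross pt p2 p3 < 0)
  let b3 := decide (pvCross pt p3 p1 < 0)
  (b1 == b2) && (b2 == b3)

def pvInRect (A B C D pt : Int × Int) : Bool :=
  pvInTri pt A B C || pvInTri pt D B C

-- lines[y][x]; out-of-range reads 0 (Python raises IndexError there — excluded by Pre_)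
def pvPx (lines : List (List Int)) (y x : Int) : Int :=
  PySem.List.pyGetD ((PySem.List.pyGet? lines y).getD []) x 0

-- the shared final branch cascade; Python returns None on the last fallthrough (excluded by Pre_)
def pvCascade (A B C D f l center : Int × Int) : (Int × Int) × (Int × Int) × (Int × Int) × (Int × Int) :=
  if pvInRect A B f l center then (A, B, f, l)
  else if pvInRect A C f l center then (C, D, f, l)
  else if pvInRect A D f l center then (A, D, f, l)
  else if pvInRect B C f l center then (B, C, f, l)
  else if pvInRect B D f l center then (B, D, f, l)
  else if pvInRect C D f l center then (C, D, f, l)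
  else (A, B, C, D)

-- A's loop body; state = (first_white_pixel?, last_white_pixel?); first_set = state.1.isSome
def pvStepA (A B C D : Int × Int) (lines : List (List Int))
    (s : Option (Int × Int) × Option (Int × Int)) (p : Int × Int) :
    Option (Int × Int) × Option (Int × Int) :=
  if pvInRect A B C D p then
    if pvPx lines p.2 p.1 == 1 && !s.1.isSome then (some p, s.2)
    else if pvPx lines p.2 p.1 == 1 && s.1.isSome then (s.1, some p)
    else s
  else s

def clipRectangle (A : Int × Int) (B : Int × Int) (C : Int × Int) (D : Int × Int) (min_y : Int) (min_x : Int) (max_y : Int) (max_x : Int) (center : Int × Int) (lines : List (List Int)) : (Int × Int) × (Int × Int) × (Int × Int) × (Int × Int) :=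
  let s := (PySem.List.pyRange min_y max_y 1).foldl (fun s y =>
      (PySem.List.pyRange min_x max_x 1).foldl (fun s x => pvStepA A B C D lines s (x, y)) s)
    (none, none)
  match s with
  | (some f, some l) => pvCascade A B C D f l center
  | (_, _) => (A, B, C, D)

-- ===== PORT B =====
def pvWhite (A B C D : Int × Int) (lines : List (List Int)) (p : Int × Int) : Bool :=
  pvInRect A B C D p && (pvPx lines p.2 p.1 == 1)

def pvGrid (min_y min_x max_y max_x : Int) : List (Int × Int) :=
  (PySem.List.pyRange min_y max_y 1).flatMap (fun y =>
    (PySem.List.pyRange min_x max_x 1).map (fun x => (x, y)))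

def pvGridRev (min_y min_x max_y max_x : Int) : List (Int × Int) :=
  (PySem.List.pyRange min_y max_y 1).reverse.flatMap (fun y =>
    (PySem.List.pyRange min_x max_x 1).reverse.map (fun x => (x, y)))

def clipRectangle_alt (A : Int × Int) (B : Int × Int) (C : Int × Int) (D : Int × Int) (min_y : Int) (min_x : Int) (max_y : Int) (max_x : Int) (center : Int × Int) (lines : List (List Int)) : (Int × Int) × (Int × Int) × (Int × Int) × (Int × Int) :=
  match (pvGrid min_y min_x max_y max_x).find? (pvWhite A B C D lines) with
  | none => (A, B, C, D)
  | some f =>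
    match (pvGridRev min_y min_x max_y max_x).find? (pvWhite A B C D lines) with
    | none => (A, B, C, D)
    | some l => if l = f then (A, B, C, D) else pvCascade A B C D f l center

-- ===== PRECONDITION & SPEC =====
def pvRowLen (lines : List (List Int)) (y : Int) : Int :=
  (((PySem.List.pyGet? lines y).getD []).length : Int)

-- half-open interval [a,b) meets closed interval [c,d]
def pvOverlap (a b c d : Int) : Prop := a < b ∧ a ≤ d ∧ c < b

-- both triangle halves of the rectangle are non-degenerate (then every inRectangle point lies in
-- the bounding box of {A,B,C,D}, so box-disjointness certifies that a region avoids the rectangle)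
def pvNondeg (A B C D : Int × Int) : Prop := pvCross A B C ≠ 0 ∧ pvCross D B C ≠ 0

-- no pixel of the scan window that is inRectangle(A,B,C,D,·) indexes `lines` outside Python's index
-- range (in-range pixels never raise, so only the window's out-of-range portion matters: it is
-- empty, or — for non-degenerate triangles — disjoint from the rectangle's bounding box)
def pvRaiseFree (A B C D : Int × Int) (min_y min_x max_y max_x : Int) (lines : List (List Int)) : Prop :=
  (max_y ≤ min_y ∨ max_x ≤ min_x) ∨
  (((-(lines.length : Int) ≤ min_y ∧ max_y ≤ (lines.length : Int)) ∨
      (pvNondeg A B C D ∧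
        (¬ pvOverlap min_x max_x (min (min A.1 B.1) (min C.1 D.1)) (max (max A.1 B.1) (max C.1 D.1)) ∨
         (¬ pvOverlap min_y (min max_y (-(lines.length : Int))) (min (min A.2 B.2) (min C.2 D.2)) (max (max A.2 B.2) (max C.2 D.2)) ∧
          ¬ pvOverlap (max min_y (lines.length : Int)) max_y (min (min A.2 B.2) (min C.2 D.2)) (max (max A.2 B.2) (max C.2 D.2)))))) ∧
    (∀ y ∈ PySem.List.pyRange (max min_y (-(lines.length : Int))) (min max_y (lines.length : Int)) 1,
      (-(pvRowLen lines y) ≤ min_x ∧ max_x ≤ pvRowLen lines y) ∨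
      (pvNondeg A B C D ∧
        (y < min (min A.2 B.2) (min C.2 D.2) ∨ max (max A.2 B.2) (max C.2 D.2) < y ∨
         (¬ pvOverlap min_x (min max_x (-(pvRowLen lines y))) (min (min A.1 B.1) (min C.1 D.1)) (max (max A.1 B.1) (max C.1 D.1)) ∧
          ¬ pvOverlap (max min_x (pvRowLen lines y)) max_x (min (min A.1 B.1) (min C.1 D.1)) (max (max A.1 B.1) (max C.1 D.1)))))))

-- the white pixels of the window in scan order; whites are always in-range, so the window is
-- clamped to the index ranges first (this keeps the check cheap even for huge windows)
def pvWhites (A B C D : Int × Int) (min_y min_x max_y max_x : Int) (lines : List (List Int)) : List (Int × Int) :=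
  ((PySem.List.pyRange (max min_y (-(lines.length : Int))) (min max_y (lines.length : Int)) 1).flatMap (fun y =>
    (PySem.List.pyRange (max min_x (-(pvRowLen lines y))) (min max_x (pvRowLen lines y)) 1).map (fun x => (x, y)))).filter
    (pvWhite A B C D lines)

-- Pre_ excludes the inputs on which Python's A does not return a 4-tuple: an in-rectangle pixel of
-- the scan window indexes `lines` out of Python's range (IndexError), and windows with >= 2 white
-- pixels where every branch of the final cascade fails (A falls off the end and returns None).
-- Stated narrowing: when the window's out-of-range portion meets the rectangle's bounding box (or a
-- triangle half is degenerate), whether A raises can only be decided by scanning the window, which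
-- may be unboundedly large; Pre_ conservatively excludes those inputs (see claim.json cites).
def Pre_clipRectangle (A : Int × Int) (B : Int × Int) (C : Int × Int) (D : Int × Int) (min_y : Int) (min_x : Int) (max_y : Int) (max_x : Int) (center : Int × Int) (lines : List (List Int)) : Prop :=
  pvRaiseFree A B C D min_y min_x max_y max_x lines ∧
  (letI W := pvWhites A B C D min_y min_x max_y max_x lines
   2 ≤ W.length →
    (pvInRect A B (W.headD (0, 0)) (W.getLastD (0, 0)) center ||
     pvInRect A C (W.headD (0, 0)) (W.getLastD (0, 0)) center ||
     pvInRect A D (W.headD (0, 0)) (W.getLastD (0, 0)) center ||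
     pvInRect B C (W.headD (0, 0)) (W.getLastD (0, 0)) center ||
     pvInRect B D (W.headD (0, 0)) (W.getLastD (0, 0)) center ||
     pvInRect C D (W.headD (0, 0)) (W.getLastD (0, 0)) center) = true)
instance (A : Int × Int) (B : Int × Int) (C : Int × Int) (D : Int × Int) (min_y : Int) (min_x : Int) (max_y : Int) (max_x : Int) (center : Int × Int) (lines : List (List Int)) : Decidable (Pre_clipRectangle A B C D min_y min_x max_y max_x center lines) := by unfold Pre_clipRectangle pvRaiseFree pvNondeg pvOverlap; infer_instance

def pvWitness_clipRectangle : (Int × Int) × (Int × Int) × (Int × Int) × (Int × Int) × Int × Int × Int × Int × (Int × Int) × List (List Int) :=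
  ((0, 0), (0, 4), (4, 0), (4, 4), 0, 0, 2, 2, (1, 1), [[1, 1], [1, 0]])

def Spec_clipRectangle (A : Int × Int) (B : Int × Int) (C : Int × Int) (D : Int × Int) (min_y : Int) (min_x : Int) (max_y : Int) (max_x : Int) (center : Int × Int) (lines : List (List Int)) (out : (Int × Int) × (Int × Int) × (Int × Int) × (Int × Int)) : Prop := out = clipRectangle_alt A B C D min_y min_x max_y max_x center lines
instance (A : Int × Int) (B : Int × Int) (C : Int × Int) (D : Int × Int) (min_y : Int) (min_x : Int) (max_y : Int) (max_x : Int) (center : Int × Int) (lines : List (List Int)) (out : (Int × Int) × (Int × Int) × (Int × Int) × (Int × Int)) : Decidable (Spec_clipRectangle A B C D min_y min_x max_y max_x center lines out) := by unfold Spec_clipRectangle; infer_instance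

-- ===== CLAIM (what is proved, stated in full; the proofs are below) =====
def Claim_equal_clipRectangle : Prop := ∀ (A : Int × Int) (B : Int × Int) (C : Int × Int) (D : Int × Int) (min_y : Int) (min_x : Int) (max_y : Int) (max_x : Int) (center : Int × Int) (lines : List (List Int)), Dom_clipRectangle A B C D min_y min_x max_y max_x center lines → Pre_clipRectangle A B C D min_y min_x max_y max_x center lines → Spec_clipRectangle A B C D min_y min_x max_y max_x center lines (clipRectangle A B C D min_y min_x max_y max_x center lines)

-- ===== LEMMAS AND PROOFS =====
theorem pvWitness_ok :
    Dom_clipRectangle (pvWitness_clipRectangle.1) (pvWitness_clipRectangle.2.1) (pvWitness_clipRectangle.2.2.1) (pvWitness_clipRectangle.2.2.2.1) (pvWitness_clipRectangle.2.2.2.2.1) (pvWitness_clipRectangle.2.2.2.2.2.1) (pvWitness_clipRectangle.2.2.2.2.2.2.1) (pvWitness_clipRectangle.2.2.2.2.2.2.2.1) (pvWitness_clipRectangle.2.2.2.2.2.2.2.2.1) (pvWitness_clipRectangle.2.2.2.2.2.2.2.2.2) ∧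
    Pre_clipRectangle (pvWitness_clipRectangle.1) (pvWitness_clipRectangle.2.1) (pvWitness_clipRectangle.2.2.1) (pvWitness_clipRectangle.2.2.2.1) (pvWitness_clipRectangle.2.2.2.2.1) (pvWitness_clipRectangle.2.2.2.2.2.1) (pvWitness_clipRectangle.2.2.2.2.2.2.1) (pvWitness_clipRectangle.2.2.2.2.2.2.2.1) (pvWitness_clipRectangle.2.2.2.2.2.2.2.2.1) (pvWitness_clipRectangle.2.2.2.2.2.2.2.2.2) := by
  constructor <;> decide

-- A's loop body, rephrased through the single predicate pvWhite
theorem pvStepA_eq (A B C D : Int × Int) (lines : List (List Int))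
    (s : Option (Int × Int) × Option (Int × Int)) (p : Int × Int) :
    pvStepA A B C D lines s p =
      if pvWhite A B C D lines p then
        (if s.1.isSome then (s.1, some p) else (some p, s.2))
      else s := by
  cases hR : pvInRect A B C D p <;> cases hP : (pvPx lines p.2 p.1 == 1) <;>
    cases hS : s.1.isSome <;> simp [pvStepA, pvWhite, hR, hP, hS]

theorem getLast?_cons_or {α : Type} (a : α) (t : List α) :
    (a :: t).getLast? = t.getLast?.or (some a) := by
  induction t generalizing a with
  | nil => rfl
  | cons b t' ih =>
    rw [List.getLast?_cons_cons, ih b]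
    cases t'.getLast? <;> rfl

theorem foldA_some (A B C D : Int × Int) (lines : List (List Int))
    (L : List (Int × Int)) (f : Int × Int) (l0 : Option (Int × Int)) :
    L.foldl (pvStepA A B C D lines) (some f, l0) =
      (some f, (L.filter (pvWhite A B C D lines)).getLast?.or l0) := by
  induction L generalizing l0 with
  | nil => simp
  | cons a L ih =>
    rw [List.foldl_cons, pvStepA_eq]
    cases ha : pvWhite A B C D lines a with
    | false => simp only [List.filter_cons, ha]; simp only [Bool.false_eq_true, if_false]; exact ih l0
    | true =>
      simp only [List.filter_cons, ha, if_true, Option.isSome_some]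
      rw [ih (some a), getLast?_cons_or, Option.or_assoc]
      cases (L.filter (pvWhite A B C D lines)).getLast? <;> rfl

theorem foldA_none (A B C D : Int × Int) (lines : List (List Int))
    (L : List (Int × Int)) :
    L.foldl (pvStepA A B C D lines) (none, none) =
      (match L.filter (pvWhite A B C D lines) with
       | [] => (none, none)
       | a :: t => (some a, t.getLast?)) := by
  induction L with
  | nil => rfl
  | cons a L ih =>
    rw [List.foldl_cons, pvStepA_eq]
    cases ha : pvWhite A B C D lines a with
    | false => simp only [List.filter_cons, ha]; simp only [Bool.false_eq_true, if_false]; exact ih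
    | true =>
      simp only [List.filter_cons, ha, if_true, Option.isSome_none, Bool.false_eq_true, if_false]
      rw [foldA_some]
      simp

theorem pvGridRev_eq (min_y min_x max_y max_x : Int) :
    pvGridRev min_y min_x max_y max_x = (pvGrid min_y min_x max_y max_x).reverse := by
  rw [pvGrid, pvGridRev, List.reverse_flatMap]
  simp only [List.map_reverse, Function.comp_def]

theorem pvGrid_nodup (min_y min_x max_y max_x : Int) :
    (pvGrid min_y min_x max_y max_x).Nodup := by
  rw [pvGrid, List.nodup_flatMap]
  refine ⟨fun y _ => ?_, ?_⟩
  · exact (PySem.List.nodup_pyRange_one min_x max_x).map (fun a b h => by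
      simpa using congrArg Prod.fst h)
  · refine (PySem.List.pairwise_lt_pyRange_one min_y max_y).imp ?_
    intro y1 y2 h p hp1 hp2
    simp only [List.mem_map] at hp1 hp2
    obtain ⟨x1, -, rfl⟩ := hp1
    obtain ⟨x2, -, h2⟩ := hp2
    exact absurd (congrArg Prod.snd h2).symm (by simpa using h.ne)

-- port A's nested loops, flattened to a single fold over the row-major grid
theorem clipA_eq (A B C D : Int × Int) (min_y min_x max_y max_x : Int)
    (center : Int × Int) (lines : List (List Int)) :
    clipRectangle A B C D min_y min_x max_y max_x center lines =
      (match (pvGrid min_y min_x max_y max_x).foldl (pvStepA A B C D lines) (none, none) with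
       | (some f, some l) => pvCascade A B C D f l center
       | (_, _) => (A, B, C, D)) := by
  rw [clipRectangle, pvGrid, List.foldl_flatMap]
  simp only [List.foldl_map]

-- ===== VERDICT (by name: the statement is the Claim_ definition above) =====
theorem clipRectangle_spec : Claim_equal_clipRectangle := by
  intro A B C D min_y min_x max_y max_x center lines _ _
  unfold Spec_clipRectangle
  rw [clipA_eq, foldA_none, clipRectangle_alt]
  rw [show (pvGrid min_y min_x max_y max_x).find? (pvWhite A B C D lines)
        = ((pvGrid min_y min_x max_y max_x).filter (pvWhite A B C D lines)).head?
      from (List.head?_filter ..).symm]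
  rw [pvGridRev_eq,
      show ((pvGrid min_y min_x max_y max_x).reverse).find? (pvWhite A B C D lines)
        = ((pvGrid min_y min_x max_y max_x).filter (pvWhite A B C D lines)).getLast? by
        rw [← List.head?_filter, List.filter_reverse, List.head?_reverse]]
  have hnd : ((pvGrid min_y min_x max_y max_x).filter (pvWhite A B C D lines)).Nodup :=
    (pvGrid_nodup min_y min_x max_y max_x).filter _
  cases hW : (pvGrid min_y min_x max_y max_x).filter (pvWhite A B C D lines) with
  | nil => rfl
  | cons a t =>
    cases t with
    | nil => simp
    | cons b t' =>
      rw [hW] at hnd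
      have hmem : (b :: t').getLast ((by simp) : b :: t' ≠ []) ∈ b :: t' := List.getLast_mem _
      have hne : (b :: t').getLast ((by simp) : b :: t' ≠ []) ≠ a := by
        intro h; rw [h] at hmem
        exact (List.nodup_cons.mp hnd).1 hmem
      have hg : (b :: t').getLast? = some ((b :: t').getLast ((by simp) : b :: t' ≠ [])) :=
        List.getLast?_eq_some_getLast _
      rw [show (a :: b :: t').getLast? = (b :: t').getLast? from List.getLast?_cons_cons]
      simp [hg, hne]
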